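-- pv_equiv track=rewrite | github.com/junnei/LeetCode | 0215-kth-largest-element-in-an-array/0215-kth-largest-element-in-an-array.py | find
-- ===== SOURCE A (Python) =====
-- def find(nums: list[int], k: int) -> tuple[list[int], int]:
--     left, right, mid = list(), list(), list()
--     limit = nums[0]
--     for num in nums:
--         if num > limit:
--             right.append(num)
--         elif num < limit:
--             left.append(num)
--         else:
--             mid.append(num)
--     len_right, len_mid = len(right), len(mid)
--     if len_right >= k:
--         return right, k
--     elif len_right + len_mid >= k:
--         return [limit], 0
--     else:
--         return left, k - len_right - len_mid
-- ===== SOURCE B (Python) =====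
-- def find(nums: list[int], k: int) -> tuple[list[int], int]:
--     limit = nums[0]
--
--     def part(lo: int, hi: int):
--         # (left, right, mid_count) for the segment nums[lo:hi], by divide and conquer
--         if hi - lo == 1:
--             x = nums[lo]
--             if x > limit:
--                 return [], [x], 0
--             if x < limit:
--                 return [x], [], 0
--             return [], [], 1
--         m = (lo + hi) // 2
--         l1, r1, m1 = part(lo, m)
--         l2, r2, m2 = part(m, hi)
--         return l1 + l2, r1 + r2, m1 + m2
--
--     left, right, len_mid = part(0, len(nums))
--     len_right = len(right)
--     if len_right >= k:
--         return right, k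
--     if len_right + len_mid >= k:
--         return [limit], 0
--     return left, k - len_right - len_mid
-- ===== Notes on version B (the rewrite author's own statement) =====
-- stated objective: alternative
-- what changed: B partitions by recursive divide-and-conquer on index ranges (split in half, partition each half, concatenate), keeping only a count for the ==limit class, instead of A's single left-to-right scan appending into three accumulator lists.
import Mathlib
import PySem

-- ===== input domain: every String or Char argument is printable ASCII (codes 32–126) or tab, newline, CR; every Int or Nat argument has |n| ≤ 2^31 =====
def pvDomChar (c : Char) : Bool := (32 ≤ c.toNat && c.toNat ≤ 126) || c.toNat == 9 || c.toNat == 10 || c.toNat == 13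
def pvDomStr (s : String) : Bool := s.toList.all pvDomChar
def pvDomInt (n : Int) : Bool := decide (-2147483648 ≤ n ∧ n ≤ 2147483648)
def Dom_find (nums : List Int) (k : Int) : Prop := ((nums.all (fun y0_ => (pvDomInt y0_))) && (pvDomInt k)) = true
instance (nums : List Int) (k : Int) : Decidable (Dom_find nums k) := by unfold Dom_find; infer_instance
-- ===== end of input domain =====

-- B partitions by recursive divide-and-conquer on index ranges instead of A's single scan
-- (alternative decomposition). Pre_ excludes the empty list, on which A raises IndexError.


-- ===== PORT A =====
def find (nums : List Int) (k : Int) : List Int × Int :=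
  match PySem.List.pyGet? nums 0 with
  | none => ([], 0)  -- Python raises IndexError here; excluded by Pre_find
  | some limit =>
    let acc := nums.foldl (fun (acc : List Int × List Int × List Int) num =>
      if num > limit then (acc.1, acc.2.1 ++ [num], acc.2.2)
      else if num < limit then (acc.1 ++ [num], acc.2.1, acc.2.2)
      else (acc.1, acc.2.1, acc.2.2 ++ [num])) ([], [], [])
    let left := acc.1
    let right := acc.2.1
    let mid := acc.2.2
    let len_right : Int := right.length
    let len_mid : Int := mid.length
    if len_right ≥ k then (right, k)
    else if len_right + len_mid ≥ k then ([limit], 0)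
    else (left, k - len_right - len_mid)

-- ===== PORT B =====
-- helper `part` of Source B: (left, right, mid_count) for the segment nums[lo:hi], divide and conquer
def partFind (nums : List Int) (limit : Int) (lo hi : Nat) : List Int × List Int × Int :=
  if hi - lo = 1 then
    match PySem.List.pyGet? nums (lo : Int) with
    | none => ([], [], 0)  -- Python would raise; never reached from find_alt's calls
    | some x =>
      if x > limit then ([], [x], 0)
      else if x < limit then ([x], [], 0)
      else ([], [], 1)
  else if 2 ≤ hi - lo then
    match partFind nums limit lo ((lo + hi) / 2), partFind nums limit ((lo + hi) / 2) hi with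
    | (l1, r1, m1), (l2, r2, m2) => (l1 ++ l2, r1 ++ r2, m1 + m2)
  else ([], [], 0)  -- empty segment; never reached from find_alt's calls (nums ≠ [])
termination_by hi - lo
decreasing_by all_goals omega

def find_alt (nums : List Int) (k : Int) : List Int × Int :=
  match PySem.List.pyGet? nums 0 with
  | none => ([], 0)  -- Python raises IndexError here; excluded by Pre_find
  | some limit =>
    let p := partFind nums limit 0 nums.length
    let left := p.1
    let right := p.2.1
    let len_mid : Int := p.2.2
    let len_right : Int := right.length
    if len_right ≥ k then (right, k)
    else if len_right + len_mid ≥ k then ([limit], 0)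
    else (left, k - len_right - len_mid)

-- ===== PRECONDITION & SPEC =====
-- Pre_ excludes exactly the empty list, on which A (nums[0]) raises IndexError.
def Pre_find (nums : List Int) (k : Int) : Prop := nums ≠ []
instance (nums : List Int) (k : Int) : Decidable (Pre_find nums k) := by unfold Pre_find; infer_instance
def pvWitness_find : List Int × Int := ([3, 1, 4, 1, 5], 2)

def Spec_find (nums : List Int) (k : Int) (out : List Int × Int) : Prop := out = find_alt nums k
instance (nums : List Int) (k : Int) (out : List Int × Int) : Decidable (Spec_find nums k out) := by unfold Spec_find; infer_instance

-- ===== CLAIM (what is proved, stated in full; the proofs are below) =====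
def Claim_equal_find : Prop := ∀ (nums : List Int) (k : Int), Dom_find nums k → Pre_find nums k → Spec_find nums k (find nums k)

-- ===== LEMMAS AND PROOFS =====

-- B's divide-and-conquer partition of nums[lo:hi] equals the filters/count over that segment.
theorem partFind_eq (nums : List Int) (limit : Int) :
    ∀ (n lo hi : Nat), hi - lo = n → lo < hi → hi ≤ nums.length →
    partFind nums limit lo hi =
      (((nums.drop lo).take (hi - lo)).filter (fun x => decide (x < limit)),
       ((nums.drop lo).take (hi - lo)).filter (fun x => decide (x > limit)),
       (((nums.drop lo).take (hi - lo)).countP (fun x => decide (x = limit)) : Int)) := by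
  intro n
  induction n using Nat.strong_induction_on with
  | _ n ih =>
    intro lo hi hn hlt hle
    rw [partFind]
    by_cases h1 : hi - lo = 1
    · have hlo : lo < nums.length := by omega
      have hseg : (nums.drop lo).take (hi - lo) = [nums[lo]] := by
        rw [h1, List.take_one, List.head?_drop, List.getElem?_eq_getElem hlo]
        rfl
      rw [if_pos h1, PySem.List.pyGet?_natCast, List.getElem?_eq_getElem hlo, hseg]
      rcases lt_trichotomy nums[lo] limit with hc | hc | hc
      · simp [hc, not_lt.mpr hc.le, show nums[lo] ≠ limit by omega]
      · simp [hc]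
      · simp [hc, not_lt.mpr hc.le, show nums[lo] ≠ limit by omega]
    · have h2 : 2 ≤ hi - lo := by omega
      rw [if_neg h1, if_pos h2]
      have hm1 : lo < (lo + hi) / 2 := by omega
      have hm2 : (lo + hi) / 2 < hi := by omega
      rw [ih ((lo + hi) / 2 - lo) (by omega) lo ((lo + hi) / 2) rfl hm1 (by omega),
          ih (hi - (lo + hi) / 2) (by omega) ((lo + hi) / 2) hi rfl hm2 hle]
      have hdd : (nums.drop lo).drop ((lo + hi) / 2 - lo) = nums.drop ((lo + hi) / 2) := by
        rw [List.drop_drop]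
        congr 1
        omega
      have hsplit : (nums.drop lo).take (hi - lo) =
          (nums.drop lo).take ((lo + hi) / 2 - lo) ++
          (nums.drop ((lo + hi) / 2)).take (hi - (lo + hi) / 2) := by
        have hadd : hi - lo = ((lo + hi) / 2 - lo) + (hi - (lo + hi) / 2) := by omega
        rw [hadd, List.take_add, hdd]
      rw [hsplit]
      simp [List.filter_append, List.countP_append]

-- A's single three-way partition pass equals the three filters.
theorem find_foldl_split (limit : Int) (nums a b c : List Int) :
    nums.foldl (fun (acc : List Int × List Int × List Int) num =>
      if num > limit then (acc.1, acc.2.1 ++ [num], acc.2.2)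
      else if num < limit then (acc.1 ++ [num], acc.2.1, acc.2.2)
      else (acc.1, acc.2.1, acc.2.2 ++ [num])) (a, b, c)
    = (a ++ nums.filter (fun x => decide (x < limit)),
       b ++ nums.filter (fun x => decide (x > limit)),
       c ++ nums.filter (fun x => decide (x = limit))) := by
  induction nums generalizing a b c with
  | nil => simp
  | cons h t ih =>
    simp only [List.foldl_cons, List.filter_cons]
    rcases lt_trichotomy h limit with hlt | heq | hgt
    · rw [if_neg (by omega), if_pos hlt, ih]
      simp [hlt, not_lt.mpr hlt.le, show h ≠ limit by omega]
    · subst heq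
      rw [if_neg (by omega), if_neg (by omega), ih]
      simp
    · rw [if_pos hgt, ih]
      simp [hgt, not_lt.mpr hgt.le, show h ≠ limit by omega]

theorem find_eq_alt (nums : List Int) (k : Int) (hne : nums ≠ []) :
    find nums k = find_alt nums k := by
  obtain ⟨h, t, rfl⟩ := List.exists_cons_of_ne_nil hne
  simp only [find, find_alt, PySem.List.pyGet?, PySem.List.pyIdx?]
  norm_num
  rw [find_foldl_split,
      partFind_eq (h :: t) h (t.length + 1) 0 (t.length + 1) (by omega) (by omega) (by simp)]
  simp [List.countP_eq_length_filter]

-- ===== VERDICT (by name: the statement is the Claim_ definition above) =====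
theorem find_spec : Claim_equal_find := by
  intro nums k _ hpre
  exact find_eq_alt nums k hpre
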